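-- pv_equiv track=rewrite | github.com/JanPeldrimovsky/work_plan | parse_plan.py | get_current_time_range
-- ===== SOURCE A (Python) =====
-- def get_current_time_range(activity_times, now):
--     lesser_equal = None
--     greater = None
--
--     for time in activity_times:
--         if time <= now and (lesser_equal is None or time > lesser_equal):
--             lesser_equal = time
--         elif now < time and (greater is None or greater > time):
--             greater = time
--
--     return lesser_equal, greater
-- ===== SOURCE B (Python) =====
-- def get_current_time_range(activity_times, now):
--     s = sorted(activity_times)
--     # binary search for the rightmost insertion point of now (hand-coded bisect_right)
--     lo, hi = 0, len(s)
--     while lo < hi: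
--         mid = (lo + hi) // 2
--         if now < s[mid]:
--             hi = mid
--         else:
--             lo = mid + 1
--     lesser_equal = s[lo - 1] if lo > 0 else None
--     greater = s[lo] if lo < len(s) else None
--     return lesser_equal, greater
-- ===== Notes on version B (the rewrite author's own statement) =====
-- stated objective: alternative
-- what changed: Replaced A's single linear scan tracking both extremes with sort-then-binary-search: sort the times, find the rightmost insertion point of now with a hand-coded bisect_right loop, and read the floor at index i-1 and the ceiling at index i.
import Mathlib
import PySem

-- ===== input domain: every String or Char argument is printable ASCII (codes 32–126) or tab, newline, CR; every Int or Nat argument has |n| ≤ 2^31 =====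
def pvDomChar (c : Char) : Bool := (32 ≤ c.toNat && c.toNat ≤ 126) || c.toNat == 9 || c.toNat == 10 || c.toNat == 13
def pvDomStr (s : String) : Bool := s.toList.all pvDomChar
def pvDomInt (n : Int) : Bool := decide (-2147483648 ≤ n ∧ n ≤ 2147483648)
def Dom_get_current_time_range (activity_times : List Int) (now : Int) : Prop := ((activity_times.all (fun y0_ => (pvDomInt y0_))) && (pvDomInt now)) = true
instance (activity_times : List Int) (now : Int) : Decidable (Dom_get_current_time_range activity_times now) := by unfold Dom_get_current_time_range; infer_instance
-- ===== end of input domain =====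

-- B finds the floor and ceiling of now by sorting the times and binary-searching the rightmost
-- insertion point of now, instead of A's single linear scan tracking both extremes; objective: alternative.

-- ===== PORT A =====
-- one loop over activity_times updating the pair (lesser_equal, greater) in place
def get_current_time_range (activity_times : List Int) (now : Int) : Option Int × Option Int :=
  activity_times.foldl
    (fun (st : Option Int × Option Int) time =>
      if decide (time ≤ now) && st.1.all (fun v => decide (time > v)) then
        (some time, st.2)
      else if decide (now < time) && st.2.all (fun v => decide (v > time)) then
        (st.1, some time)
      else
        st)
    (none, none)

-- ===== PORT B =====
-- the while-loop binary search of Source B: lo, hi narrow until lo = insertion point of now.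
-- s.getD mid 0 ports Python's s[mid]: exact here since the loop keeps 0 ≤ lo ≤ mid < hi ≤ len(s).
def pvBisect (s : List Int) (x : Int) (lo hi : Nat) : Nat :=
  if _h : lo < hi then
    let mid := (lo + hi) / 2
    if x < s.getD mid 0 then pvBisect s x lo mid
    else pvBisect s x (mid + 1) hi
  else lo
termination_by hi - lo
decreasing_by all_goals omega

-- s = sorted(activity_times); i = bisect loop; s[i-1] if i>0 else None; s[i] if i<len(s) else None
def get_current_time_range_alt (activity_times : List Int) (now : Int) : Option Int × Option Int :=
  let s := PySem.List.sorted activity_times (fun y => y) false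
  let i := pvBisect s now 0 s.length
  ((if 0 < i then PySem.List.pyGet? s ((i : Int) - 1) else none),
   (if i < s.length then PySem.List.pyGet? s (i : Int) else none))

-- ===== PRECONDITION & SPEC =====
def Spec_get_current_time_range (activity_times : List Int) (now : Int) (out : Option Int × Option Int) : Prop := out = get_current_time_range_alt activity_times now
instance (activity_times : List Int) (now : Int) (out : Option Int × Option Int) : Decidable (Spec_get_current_time_range activity_times now out) := by unfold Spec_get_current_time_range; infer_instance

-- ===== CLAIM (what is proved, stated in full; the proofs are below) =====
def Claim_equal_get_current_time_range : Prop := ∀ (activity_times : List Int) (now : Int), Dom_get_current_time_range activity_times now → Spec_get_current_time_range activity_times now (get_current_time_range activity_times now)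

-- ===== LEMMAS AND PROOFS =====

-- ---- A-side: the single loop splits into max of the ≤ now part and min of the > now part ----

-- A's update of the first component, in isolation
def pvUpMax (a : Option Int) (t : Int) : Option Int :=
  if a.all (fun v => decide (t > v)) then some t else a

-- A's update of the second component, in isolation
def pvUpMin (b : Option Int) (t : Int) : Option Int :=
  if b.all (fun v => decide (v > t)) then some t else b

lemma pvUpMax_some (v t : Int) : pvUpMax (some v) t = some (max v t) := by
  simp only [pvUpMax, Option.all_some]
  split <;> (rename_i h; simp_all) <;> omega

lemma pvUpMin_some (v t : Int) : pvUpMin (some v) t = some (min v t) := by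
  simp only [pvUpMin, Option.all_some]
  split <;> (rename_i h; simp_all) <;> omega

-- A's loop splits into two independent folds over the two filtered sublists
lemma loop_split (now : Int) (l : List Int) (a b : Option Int) :
    l.foldl
      (fun (st : Option Int × Option Int) time =>
        if decide (time ≤ now) && st.1.all (fun v => decide (time > v)) then
          (some time, st.2)
        else if decide (now < time) && st.2.all (fun v => decide (v > time)) then
          (st.1, some time)
        else
          st)
      (a, b)
    = ((l.filter (fun t => decide (t ≤ now))).foldl pvUpMax a,
       (l.filter (fun t => decide (now < t))).foldl pvUpMin b) := by
  induction l generalizing a b with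
  | nil => simp
  | cons t l ih =>
    simp only [List.foldl_cons, List.filter_cons]
    by_cases h : t ≤ now
    · have h2 : ¬ now < t := by omega
      simp only [h, h2, decide_true, decide_false, Bool.true_and, Bool.false_and,
        if_true]
      rcases hb : (a.all (fun v => decide (t > v))) with _ | _
      · simpa [pvUpMax, hb] using ih a b
      · simpa [pvUpMax, hb] using ih (some t) b
    · have h2 : now < t := by omega
      simp only [h, h2, decide_true, decide_false, Bool.true_and, Bool.false_and,
        if_true]
      rcases hb : (b.all (fun v => decide (v > t))) with _ | _
      · simpa [pvUpMin, hb] using ih a b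
      · simpa [pvUpMin, hb] using ih a (some t)

lemma foldl_pvUpMax_some (l : List Int) (v : Int) :
    l.foldl pvUpMax (some v) = some (l.foldl max v) := by
  induction l generalizing v with
  | nil => rfl
  | cons t l ih => simp [pvUpMax_some, ih]

lemma foldl_pvUpMin_some (l : List Int) (v : Int) :
    l.foldl pvUpMin (some v) = some (l.foldl min v) := by
  induction l generalizing v with
  | nil => rfl
  | cons t l ih => simp [pvUpMin_some, ih]

lemma foldl_pvUpMax_none (l : List Int) :
    l.foldl pvUpMax none = PySem.List.max? l (fun y => y) := by
  cases l with
  | nil => rfl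
  | cons x t =>
    simp [PySem.List.max?_id_cons, pvUpMax, foldl_pvUpMax_some]

lemma foldl_pvUpMin_none (l : List Int) :
    l.foldl pvUpMin none = PySem.List.min? l (fun y => y) := by
  cases l with
  | nil => rfl
  | cons x t =>
    simp [PySem.List.min?_id_cons, pvUpMin, foldl_pvUpMin_some]

lemma A_eq (l : List Int) (now : Int) :
    get_current_time_range l now
      = (PySem.List.max? (l.filter (fun t => decide (t ≤ now))) (fun y => y),
         PySem.List.min? (l.filter (fun t => decide (now < t))) (fun y => y)) := by
  rw [get_current_time_range, loop_split, foldl_pvUpMax_none, foldl_pvUpMin_none]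

-- ---- permutation invariance of max?/min? with the identity key ----

lemma foldl_pvUpMax_perm {l1 l2 : List Int} (h : l1.Perm l2) (a : Option Int) :
    l1.foldl pvUpMax a = l2.foldl pvUpMax a := by
  induction h generalizing a with
  | nil => rfl
  | cons x _ ih => simp only [List.foldl_cons]; exact ih _
  | swap x y l =>
    simp only [List.foldl_cons]
    congr 1
    have h1 : ∀ z : Int, pvUpMax none z = some z := fun z => rfl
    cases a with
    | none => rw [h1, h1, pvUpMax_some, pvUpMax_some, max_comm]
    | some v => rw [pvUpMax_some, pvUpMax_some, pvUpMax_some, pvUpMax_some,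
        max_assoc, max_assoc, max_comm x y]
  | trans _ _ ih1 ih2 => exact (ih1 a).trans (ih2 a)

lemma foldl_pvUpMin_perm {l1 l2 : List Int} (h : l1.Perm l2) (a : Option Int) :
    l1.foldl pvUpMin a = l2.foldl pvUpMin a := by
  induction h generalizing a with
  | nil => rfl
  | cons x _ ih => simp only [List.foldl_cons]; exact ih _
  | swap x y l =>
    simp only [List.foldl_cons]
    congr 1
    have h1 : ∀ z : Int, pvUpMin none z = some z := fun z => rfl
    cases a with
    | none => rw [h1, h1, pvUpMin_some, pvUpMin_some, min_comm]
    | some v => rw [pvUpMin_some, pvUpMin_some, pvUpMin_some, pvUpMin_some,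
        min_assoc, min_assoc, min_comm x y]
  | trans _ _ ih1 ih2 => exact (ih1 a).trans (ih2 a)

lemma max?_perm {l1 l2 : List Int} (h : l1.Perm l2) :
    PySem.List.max? l1 (fun y => y) = PySem.List.max? l2 (fun y => y) := by
  rw [← foldl_pvUpMax_none, ← foldl_pvUpMax_none, foldl_pvUpMax_perm h]

lemma min?_perm {l1 l2 : List Int} (h : l1.Perm l2) :
    PySem.List.min? l1 (fun y => y) = PySem.List.min? l2 (fun y => y) := by
  rw [← foldl_pvUpMin_none, ← foldl_pvUpMin_none, foldl_pvUpMin_perm h]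

-- ---- max?/min? of a list with a greatest/least member ----

lemma foldl_max_eq (t : List Int) (x m : Int) (hx : x ≤ m)
    (hm : m = x ∨ m ∈ t) (hall : ∀ y ∈ t, y ≤ m) :
    t.foldl max x = m := by
  induction t generalizing x with
  | nil =>
    rcases hm with rfl | h
    · rfl
    · simp at h
  | cons y t ih =>
    simp only [List.foldl_cons]
    apply ih
    · exact max_le hx (hall y (by simp))
    · rcases hm with rfl | h
      · left; have := hall y (by simp); omega
      · rcases List.mem_cons.mp h with rfl | h
        · left; omega
        · right; exact h
    · intro z hz; exact hall z (by simp [hz])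

lemma max?_eq_of_greatest (l : List Int) (m : Int) (hm : m ∈ l)
    (hall : ∀ y ∈ l, y ≤ m) : PySem.List.max? l (fun y => y) = some m := by
  cases l with
  | nil => simp at hm
  | cons x t =>
    rw [PySem.List.max?_id_cons]
    congr 1
    apply foldl_max_eq
    · exact hall x (by simp)
    · rcases List.mem_cons.mp hm with rfl | h
      · left; rfl
      · right; exact h
    · intro z hz; exact hall z (by simp [hz])

lemma foldl_min_eq (t : List Int) (x m : Int) (hx : m ≤ x)
    (hm : m = x ∨ m ∈ t) (hall : ∀ y ∈ t, m ≤ y) :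
    t.foldl min x = m := by
  induction t generalizing x with
  | nil =>
    rcases hm with rfl | h
    · rfl
    · simp at h
  | cons y t ih =>
    simp only [List.foldl_cons]
    apply ih
    · exact le_min hx (hall y (by simp))
    · rcases hm with rfl | h
      · left; have := hall y (by simp); omega
      · rcases List.mem_cons.mp h with rfl | h
        · left; omega
        · right; exact h
    · intro z hz; exact hall z (by simp [hz])

lemma min?_eq_of_least (l : List Int) (m : Int) (hm : m ∈ l)
    (hall : ∀ y ∈ l, m ≤ y) : PySem.List.min? l (fun y => y) = some m := by
  cases l with
  | nil => simp at hm
  | cons x t =>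
    rw [PySem.List.min?_id_cons]
    congr 1
    apply foldl_min_eq
    · exact hall x (by simp)
    · rcases List.mem_cons.mp hm with rfl | h
      · left; rfl
      · right; exact h
    · intro z hz; exact hall z (by simp [hz])

-- ---- the filtered sublists of the sorted list are its prefix/suffix at the cut point ----

lemma filter_eq_take (p : Int → Bool) (s : List Int) (i : Nat) (hi : i ≤ s.length)
    (h1 : ∀ (j : Nat) (hj : j < s.length), j < i → p s[j] = true)
    (h2 : ∀ (j : Nat) (hj : j < s.length), i ≤ j → p s[j] = false) :
    s.filter p = s.take i := by
  induction s generalizing i with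
  | nil => simp
  | cons x t ih =>
    cases i with
    | zero =>
      simp only [List.take_zero]
      have hx := h2 0 (by simp) (by omega)
      simp only [List.getElem_cons_zero] at hx
      rw [List.filter_cons, if_neg (by simp [hx])]
      exact ih 0 (by omega)
        (fun j hj h => by omega)
        (fun j hj _ => by simpa using h2 (j + 1) (by simpa using Nat.succ_lt_succ hj) (by omega))
    | succ i =>
      have hx := h1 0 (by simp) (by omega)
      simp only [List.getElem_cons_zero] at hx
      rw [List.filter_cons, if_pos (by simp [hx]), List.take_succ_cons]
      congr 1
      exact ih i (by simpa using hi)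
        (fun j hj h => by simpa using h1 (j + 1) (by simpa using Nat.succ_lt_succ hj) (by omega))
        (fun j hj h => by simpa using h2 (j + 1) (by simpa using Nat.succ_lt_succ hj) (by omega))

lemma filter_eq_drop (q : Int → Bool) (s : List Int) (i : Nat) (hi : i ≤ s.length)
    (h1 : ∀ (j : Nat) (hj : j < s.length), j < i → q s[j] = false)
    (h2 : ∀ (j : Nat) (hj : j < s.length), i ≤ j → q s[j] = true) :
    s.filter q = s.drop i := by
  induction s generalizing i with
  | nil => simp
  | cons x t ih =>
    cases i with
    | zero =>
      rw [List.drop_zero]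
      apply List.filter_eq_self.mpr
      intro a ha
      obtain ⟨j, hj, rfl⟩ := List.mem_iff_getElem.mp ha
      exact h2 j hj (by omega)
    | succ i =>
      have hx := h1 0 (by simp) (by omega)
      simp only [List.getElem_cons_zero] at hx
      rw [List.filter_cons, if_neg (by simp [hx]), List.drop_succ_cons]
      exact ih i (by simpa using hi)
        (fun j hj h => by simpa using h1 (j + 1) (by simpa using Nat.succ_lt_succ hj) (by omega))
        (fun j hj h => by simpa using h2 (j + 1) (by simpa using Nat.succ_lt_succ hj) (by omega))

-- ---- the binary search computes bisect_right's insertion point ----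

lemma pvBisect_spec (s : List Int) (x : Int) (hsort : s.Pairwise (fun a b => a ≤ b)) :
    ∀ (lo hi : Nat), hi ≤ s.length → lo ≤ hi →
    (∀ (j : Nat) (hj : j < s.length), j < lo → s[j] ≤ x) →
    (∀ (j : Nat) (hj : j < s.length), hi ≤ j → x < s[j]) →
    pvBisect s x lo hi ≤ s.length ∧
      (∀ (j : Nat) (hj : j < s.length), j < pvBisect s x lo hi → s[j] ≤ x) ∧
      (∀ (j : Nat) (hj : j < s.length), pvBisect s x lo hi ≤ j → x < s[j]) := by
  have hmono : ∀ (p q : Nat) (hp : p < s.length) (hq : q < s.length), p ≤ q → s[p] ≤ s[q] := by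
    intro p q hp hq hpq
    rcases Nat.lt_or_ge p q with h | h
    · exact List.pairwise_iff_getElem.mp hsort p q hp hq h
    · have : p = q := by omega
      subst this; rfl
  intro lo hi
  induction lo, hi using pvBisect.induct s x with
  | case1 lo hi h mid hlt ih =>
    intro hhi hlohi h1 h2
    rw [pvBisect, dif_pos h, if_pos hlt]
    have hmid : mid < s.length := by omega
    have hmx : x < s[mid] := by
      rwa [List.getD_eq_getElem s 0 hmid] at hlt
    exact ih (by omega) (by omega) h1
      (fun j hj hij => lt_of_lt_of_le hmx (hmono mid j hmid hj hij))
  | case2 lo hi h mid hlt ih =>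
    intro hhi hlohi h1 h2
    rw [pvBisect, dif_pos h, if_neg hlt]
    have hmid : mid < s.length := by omega
    have hmx : s[mid] ≤ x := by
      rw [List.getD_eq_getElem s 0 hmid] at hlt
      omega
    exact ih hhi (by omega)
      (fun j hj hij => le_trans (hmono j mid hj hmid (by omega)) hmx) h2
  | case3 lo hi h =>
    intro hhi hlohi h1 h2
    rw [pvBisect, dif_neg h]
    exact ⟨by omega, h1, fun j hj hij => h2 j hj (by omega)⟩

-- ---- B unfolds to the same max-of-prefix / min-of-suffix pair ----

lemma alt_eq (l : List Int) (now : Int) :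
    get_current_time_range_alt l now
      = (PySem.List.max? (l.filter (fun t => decide (t ≤ now))) (fun y => y),
         PySem.List.min? (l.filter (fun t => decide (now < t))) (fun y => y)) := by
  rw [get_current_time_range_alt]
  set s := PySem.List.sorted l (fun y => y) false with hs
  have hsort : s.Pairwise (fun a b => a ≤ b) := PySem.List.sorted_pairwise l (fun y => y)
  have hperm : s.Perm l := PySem.List.sorted_perm l (fun y => y) false
  obtain ⟨hle, hlt', hgt⟩ := pvBisect_spec s now hsort 0 s.length le_rfl (by omega)
    (fun j hj hij => by omega) (fun j hj hij => by omega)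
  set i := pvBisect s now 0 s.length with hi
  have hmono : ∀ (p q : Nat) (hp : p < s.length) (hq : q < s.length), p ≤ q → s[p] ≤ s[q] := by
    intro p q hp hq hpq
    rcases Nat.lt_or_ge p q with h | h
    · exact List.pairwise_iff_getElem.mp hsort p q hp hq h
    · have : p = q := by omega
      subst this; rfl
  have hftake : s.filter (fun t => decide (t ≤ now)) = s.take i :=
    filter_eq_take _ s i hle
      (fun j hj hij => by simpa using hlt' j hj hij)
      (fun j hj hij => by simpa using not_le.mpr (hgt j hj hij))
  have hfdrop : s.filter (fun t => decide (now < t)) = s.drop i :=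
    filter_eq_drop _ s i hle
      (fun j hj hij => by simpa using not_lt.mpr (hlt' j hj hij))
      (fun j hj hij => by simpa using hgt j hj hij)
  have hmax : PySem.List.max? (l.filter (fun t => decide (t ≤ now))) (fun y => y)
      = (if 0 < i then PySem.List.pyGet? s ((i : Int) - 1) else none) := by
    rw [max?_perm ((hperm.filter _).symm), hftake]
    by_cases h0 : 0 < i
    · rw [if_pos h0]
      have him : i - 1 < s.length := by omega
      have hcast : (i : Int) - 1 = ((i - 1 : Nat) : Int) := by push_cast [Nat.cast_sub h0]; ring
      rw [hcast, PySem.List.pyGet?_natCast, List.getElem?_eq_getElem him]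
      apply max?_eq_of_greatest
      · refine List.mem_iff_getElem.mpr ⟨i - 1, ?_, ?_⟩
        · simpa [List.length_take] using (by omega : i - 1 < min i s.length)
        · rw [List.getElem_take]
      · intro y hy
        obtain ⟨j, hj, rfl⟩ := List.mem_iff_getElem.mp hy
        rw [List.getElem_take]
        exact hmono j (i - 1) (by simp at hj; omega) him (by simp at hj; omega)
    · rw [if_neg h0]
      have : i = 0 := by omega
      simp [this, PySem.List.max?]
  have hmin : PySem.List.min? (l.filter (fun t => decide (now < t))) (fun y => y)
      = (if i < s.length then PySem.List.pyGet? s (i : Int) else none) := by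
    rw [min?_perm ((hperm.filter _).symm), hfdrop]
    by_cases h0 : i < s.length
    · rw [if_pos h0, PySem.List.pyGet?_natCast, List.getElem?_eq_getElem h0]
      apply min?_eq_of_least
      · refine List.mem_iff_getElem.mpr ⟨0, ?_, ?_⟩
        · simpa [List.length_drop] using (by omega : 0 < s.length - i)
        · rw [List.getElem_drop]; simp
      · intro y hy
        obtain ⟨j, hj, rfl⟩ := List.mem_iff_getElem.mp hy
        rw [List.getElem_drop]
        exact hmono i (i + j) h0 (by simp at hj; omega) (by omega)
    · rw [if_neg h0]
      have : s.drop i = [] := List.drop_eq_nil_of_le (by omega)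
      simp [this, PySem.List.min?]
  simp only [← hmax, ← hmin]

-- ===== VERDICT (by name: the statement is the Claim_ definition above) =====
theorem get_current_time_range_spec : Claim_equal_get_current_time_range := by
  intro l now _
  show _ = _
  rw [A_eq]
  exact (alt_eq l now).symm
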